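-- pv_equiv track=rewrite | github.com/ohmema/interview | python/interview/DynamicProgramming/largest_product.py | largest_product_using_n_1_entries
-- ===== SOURCE A (Python) =====
-- def largest_product_using_n_1_entries(_list):
--
--     max_product = 0
--     for i in range(len(_list)):
--         products = 1
--         for j in range(len(_list)):
--            if j !=i:
--                products *=_list[j]
--         max_product = max(max_product, products)
--     return max_product
-- ===== SOURCE B (Python) =====
-- def largest_product_using_n_1_entries(_list):
--     n = len(_list)
--     suffix = [1] * (n + 1)
--     for k in range(n - 1, -1, -1):
--         suffix[k] = _list[k] * suffix[k + 1]
--     best = 0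
--     prefix = 1
--     for i in range(n):
--         best = max(best, prefix * suffix[i + 1])
--         prefix *= _list[i]
--     return best
-- ===== Notes on version B (the rewrite author's own statement) =====
-- stated objective: faster
-- what changed: Replaces A's nested loops (for each i, re-multiply all other elements) by a suffix-product array plus a running prefix product, so each leave-one-out product is obtained in O(1) multiplications; intended as faster, measured 14.5x at n=1024 (at n=4096 A timed out).
import Mathlib
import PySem

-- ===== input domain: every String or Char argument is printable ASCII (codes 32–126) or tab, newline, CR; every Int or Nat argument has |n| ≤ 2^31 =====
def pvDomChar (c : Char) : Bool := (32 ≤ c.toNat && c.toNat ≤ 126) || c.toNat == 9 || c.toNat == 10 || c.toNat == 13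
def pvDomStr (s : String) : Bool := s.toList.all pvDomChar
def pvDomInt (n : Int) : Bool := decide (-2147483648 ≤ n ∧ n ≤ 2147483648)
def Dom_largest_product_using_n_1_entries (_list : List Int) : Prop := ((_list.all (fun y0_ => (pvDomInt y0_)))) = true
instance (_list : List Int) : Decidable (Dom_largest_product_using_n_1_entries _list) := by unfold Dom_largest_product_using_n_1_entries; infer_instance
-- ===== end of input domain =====

-- B replaces A's nested loops by a suffix-product array plus a running prefix product; intended as faster (measured 14.5x at n=1024; at n=4096 A timed out), return values identical.

-- ===== PORT A =====
def largest_product_using_n_1_entries (_list : List Int) : Int :=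
  (PySem.List.pyRange 0 (_list.length : Int)).foldl
    (fun max_product i =>
      max max_product
        ((PySem.List.pyRange 0 (_list.length : Int)).foldl
          (fun products j => if j ≠ i then products * PySem.List.pyGetD _list j 0 else products)
          1))
    0

-- ===== PORT B =====
-- suffix[k] = _list[k] * suffix[k+1], built from the right (Source B's reversed loop), suffix[n] = 1
def pvSuffixProds : List Int → List Int
  | [] => [1]
  | x :: xs =>
    let s := pvSuffixProds xs
    (x * s.headD 1) :: s

-- the forward loop of Source B: best/prefix accumulators, consuming suffix[i+1] at each step
def pvAltGo : List Int → List Int → Int → Int → Int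
  | [], _, best, _ => best
  | x :: xs, s, best, pre => pvAltGo xs (s.drop 1) (max best (pre * s.headD 1)) (pre * x)

def largest_product_using_n_1_entries_alt (_list : List Int) : Int :=
  pvAltGo _list ((pvSuffixProds _list).drop 1) 0 1

-- ===== PRECONDITION & SPEC =====
def Spec_largest_product_using_n_1_entries (_list : List Int) (out : Int) : Prop := out = largest_product_using_n_1_entries_alt _list
instance (_list : List Int) (out : Int) : Decidable (Spec_largest_product_using_n_1_entries _list out) := by unfold Spec_largest_product_using_n_1_entries; infer_instance

-- ===== CLAIM (what is proved, stated in full; the proofs are below) =====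
def Claim_equal_largest_product_using_n_1_entries : Prop := ∀ (_list : List Int), Dom_largest_product_using_n_1_entries _list → Spec_largest_product_using_n_1_entries _list (largest_product_using_n_1_entries _list)

-- ===== LEMMAS AND PROOFS =====

-- common reference form: running max of pre * (leave-one-out product of the remaining list)
def pvSpec : List Int → Int → Int → Int
  | [], _, best => best
  | x :: xs, pre, best => pvSpec xs (pre * x) (max best (pre * xs.prod))

theorem pvSuffixProds_headD (l : List Int) : (pvSuffixProds l).headD 1 = l.prod := by
  induction l with
  | nil => simp [pvSuffixProds]
  | cons x xs ih => simp only [pvSuffixProds, List.headD_cons, ih, List.prod_cons]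

theorem alt_eq_pvSpec (l : List Int) (best pre : Int) :
    pvAltGo l ((pvSuffixProds l).drop 1) best pre = pvSpec l pre best := by
  induction l generalizing best pre with
  | nil => simp [pvAltGo, pvSpec]
  | cons x xs ih =>
    simp only [pvSuffixProds, pvAltGo, List.drop_one, List.tail_cons, pvSpec]
    rw [← List.drop_one, pvSuffixProds_headD, ih]

theorem pvSpec_eq_foldl (l : List Int) (pre best : Int) :
    pvSpec l pre best =
      (List.range l.length).foldl
        (fun b k => max b (pre * ((l.take k).prod * (l.drop (k + 1)).prod))) best := by
  induction l generalizing pre best with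
  | nil => simp [pvSpec]
  | cons x xs ih =>
    simp only [pvSpec, List.length_cons, List.range_succ_eq_map, List.foldl_cons, List.foldl_map,
      List.take_zero, List.prod_nil, List.drop_succ_cons, List.drop_zero, one_mul]
    rw [ih]
    congr 1
    funext b k
    simp only [Nat.succ_eq_add_one, List.take_succ_cons, List.prod_cons]
    ring_nf

-- A's inner loop computes the leave-one-out product: prefix * suffix
theorem inner_loop_eq (l : List Int) (i : Int) (h0 : 0 ≤ i) (hn : i < (l.length : Int)) :
    (PySem.List.pyRange 0 (l.length : Int)).foldl
      (fun products j => if j ≠ i then products * PySem.List.pyGetD l j 0 else products) 1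
      = (l.take i.toNat).prod * (l.drop (i.toNat + 1)).prod := by
  rw [PySem.List.pyRange_one_append 0 i (l.length : Int) h0 (le_of_lt hn),
      PySem.List.pyRange_one_append i (i + 1) (l.length : Int) (by omega) (by omega),
      List.foldl_append, List.foldl_append, PySem.List.pyRange_one_singleton]
  -- prefix segment: every j < i, so the branch always multiplies; indices stay inside l.take i.toNat
  have hpre : (PySem.List.pyRange 0 i).foldl
      (fun products j => if j ≠ i then products * PySem.List.pyGetD l j 0 else products) 1
      = (l.take i.toNat).prod := by
    rw [PySem.List.foldl_congr_mem _ _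
        (fun products j => products * PySem.List.pyGetD (l.take i.toNat) j 0) 1 ?_]
    · have hl : ((l.take i.toNat).length : Int) = i := by
        simp [List.length_take]; omega
      have := PySem.List.foldl_pyRange_pyGetD (l.take i.toNat) 0
        (fun (p : Int) (x : Int) => p * x) 1 (a := 0) le_rfl
      simp only [PySem.List.len_eq, hl, Int.toNat_zero, List.drop_zero] at this
      rw [this, ← List.prod_eq_foldl]  -- foldl (*) 1 = prod
    · intro acc x hx
      rw [PySem.List.mem_pyRange_one] at hx
      have hne : x ≠ i := by omega
      have hti : (List.take i.toNat l).length = i.toNat := by rw [List.length_take]; omega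
      simp only [hne, if_true, ne_eq, not_false_eq_true]
      congr 1
      rw [PySem.List.pyGetD_eq_getElem (List.take i.toNat l) 0 hx.1 (by rw [hti]; omega),
          PySem.List.pyGetD_eq_getElem l 0 hx.1 (by omega)]
      rw [List.getElem_take]
  -- middle: j = i, skipped
  have hmid : ∀ (p : Int), List.foldl
      (fun products j => if j ≠ i then products * PySem.List.pyGetD l j 0 else products) p [i] = p := by
    intro p; simp
  have hfold : ∀ (p : Int) (t : List Int), t.foldl (fun q x => q * x) p = p * t.prod := by
    intro p t
    induction t generalizing p with
    | nil => simp
    | cons y ys iht => simp only [List.foldl_cons, List.prod_cons, iht]; ring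
  -- suffix segment: all j > i, multiply; this is a fold over l.drop (i+1)
  have hsuf : ∀ (p : Int), (PySem.List.pyRange (i + 1) (l.length : Int)).foldl
      (fun products j => if j ≠ i then products * PySem.List.pyGetD l j 0 else products) p
      = p * (l.drop (i.toNat + 1)).prod := by
    intro p
    rw [PySem.List.foldl_congr_mem _ _
        (fun products j => products * PySem.List.pyGetD l j 0) p ?_]
    · have heq := PySem.List.foldl_pyRange_pyGetD' l 0
        (fun (q : Int) (x : Int) => q * x) p (a := i + 1) (by omega)
      rw [heq, hfold, show (i + 1).toNat = i.toNat + 1 from by omega]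
    · intro acc x hx
      rw [PySem.List.mem_pyRange_one] at hx
      have hne : x ≠ i := by omega
      simp [hne]
  rw [hpre, hmid, hsuf]

theorem a_eq_pvSpec (l : List Int) :
    largest_product_using_n_1_entries l = pvSpec l 1 0 := by
  unfold largest_product_using_n_1_entries
  rw [pvSpec_eq_foldl]
  rw [PySem.List.foldl_congr_mem _ _
      (fun max_product i => max max_product
        ((l.take i.toNat).prod * (l.drop (i.toNat + 1)).prod)) 0 ?_]
  · rw [PySem.List.pyRange_zero_natCast, List.foldl_map]
    refine PySem.List.foldl_congr_mem _ _ _ 0 ?_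
    intro acc k _
    simp [one_mul]
  · intro acc x hx
    rw [PySem.List.mem_pyRange_one] at hx
    rw [inner_loop_eq l x hx.1 hx.2]

-- ===== VERDICT (by name: the statement is the Claim_ definition above) =====
theorem largest_product_using_n_1_entries_spec : Claim_equal_largest_product_using_n_1_entries := by
  intro l _
  unfold Spec_largest_product_using_n_1_entries largest_product_using_n_1_entries_alt
  rw [alt_eq_pvSpec, a_eq_pvSpec]
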